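-- pv_equiv track=rewrite | github.com/beejjorgensen/aoc2021 | day17/solution2.py | fire_broadside
-- ===== SOURCE A (Python) =====
-- minx = 155
--
-- maxx = 215
--
-- miny = -132
--
-- maxy = -72
--
-- def fire_broadside(good_x_velocities, good_y_velocities):
-- 	hits = set()
--
-- 	for starting_xv in good_x_velocities:
-- 		for starting_yv in good_y_velocities:
-- 			# Fire!
-- 			x = 0
-- 			y = 0
--
-- 			xv = starting_xv
-- 			yv = starting_yv
--
-- 			while x <= maxx and y >= miny:
-- 				if x >= minx and x <= maxx and y >= miny and y <= maxy:
-- 					hits.add((starting_xv, starting_yv))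
-- 					break
--
-- 				x += xv
-- 				y += yv
--
-- 				xv -= 1
-- 				yv -= 1
--
-- 				if xv < 0: xv = 0
--
-- 	return hits
-- ===== SOURCE B (Python) =====
-- minx = 155
--
-- maxx = 215
--
-- miny = -132
--
-- maxy = -72
--
-- def fire_broadside(good_x_velocities, good_y_velocities):
-- 	# x and y motion are independent: simulate each velocity ONCE, recording
-- 	# the set of step indices at which that coordinate is inside the target
-- 	# band; a pair hits iff its two step sets share a step.  An x shot whose
-- 	# velocity reaches 0 inside the band stays there forever: that is the
-- 	# "tail" t0 (every step >= t0 is in range).  The y scan is cut off at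
-- 	# t_lim when no tail exists, since later steps cannot matter.
-- 	def x_info(vx):
-- 		steps = set()
-- 		x, v, t = 0, vx, 0
-- 		while x <= maxx:
-- 			if v <= 0:
-- 				if x >= minx:
-- 					return steps, t
-- 				return steps, None
-- 			if x >= minx:
-- 				steps.add(t)
-- 			x += v
-- 			v -= 1
-- 			t += 1
-- 		return steps, None
--
-- 	x_infos = [x_info(vx) for vx in good_x_velocities]
-- 	unbounded = any(t0 is not None for _, t0 in x_infos)
-- 	t_lim = 1 + max((max(s, default=-1) for s, _ in x_infos), default=-1)
--
-- 	def y_steps(vy):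
-- 		steps = set()
-- 		y, v, t = 0, vy, 0
-- 		while y >= miny and (unbounded or t < t_lim):
-- 			if y <= maxy:
-- 				steps.add(t)
-- 			y += v
-- 			v -= 1
-- 			t += 1
-- 		return steps
--
-- 	y_infos = [y_steps(vy) for vy in good_y_velocities]
--
-- 	hits = set()
-- 	for vx, (sx, t0) in zip(good_x_velocities, x_infos):
-- 		for vy, sy in zip(good_y_velocities, y_infos):
-- 			if (not sx.isdisjoint(sy)) or (t0 is not None and any(t >= t0 for t in sy)):
-- 				hits.add((vx, vy))
-- 	return hits
-- ===== Notes on version B (the rewrite author's own statement) =====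
-- stated objective: faster
-- what changed: Instead of simulating the full trajectory for every (vx, vy) pair, B exploits the independence of x and y motion: it simulates each x velocity once (bounded, with an explicit 'frozen inside the band from step t0' tail) and each y velocity once, recording the step indices at which that coordinate is inside the target band, and a pair hits iff the two step sets intersect or the y set reaches the x tail.
import Mathlib
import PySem

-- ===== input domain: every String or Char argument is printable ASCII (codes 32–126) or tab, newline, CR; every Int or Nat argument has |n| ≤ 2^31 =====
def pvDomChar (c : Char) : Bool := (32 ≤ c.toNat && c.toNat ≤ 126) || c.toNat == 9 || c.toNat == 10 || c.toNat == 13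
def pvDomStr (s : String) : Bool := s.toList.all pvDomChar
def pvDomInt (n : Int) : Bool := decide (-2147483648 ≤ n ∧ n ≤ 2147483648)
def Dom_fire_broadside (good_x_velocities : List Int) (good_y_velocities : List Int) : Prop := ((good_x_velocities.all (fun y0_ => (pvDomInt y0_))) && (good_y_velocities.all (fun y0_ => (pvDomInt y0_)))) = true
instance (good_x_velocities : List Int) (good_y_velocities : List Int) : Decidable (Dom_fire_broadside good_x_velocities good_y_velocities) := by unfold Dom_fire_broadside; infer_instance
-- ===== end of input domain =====

-- B replaces A's per-pair trajectory simulation by per-velocity step-index sets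
-- (x and y motion are independent), which is measurably faster; return value only
-- (neither program mutates its arguments).

-- ===== PORT A =====
-- helper for the termination measure of A's while loop (twice the maximal future
-- height gain of the y coordinate); not part of the computation itself
def pvT2 (v : Int) : Int := if 0 < v then v * (v + 1) else 0

-- termination measure argument for both while-y loops (cited by decreasing_by)
theorem pvDecStep (y v : Int) (hg : -132 ≤ y) :
    Prod.Lex (· < ·) (· < ·)
      (((2 * (y + v) + pvT2 (v - 1) + 268).toNat, (v - 1 + 1).toNat) : Nat × Nat)
      ((2 * y + pvT2 v + 268).toNat, (v + 1).toNat) := by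
  rcases lt_trichotomy v 0 with h | h | h
  · apply Prod.Lex.left
    simp only [pvT2]
    rw [if_neg (by omega : ¬ (0:Int) < v - 1), if_neg (by omega : ¬ (0:Int) < v)]
    omega
  · subst h
    apply Prod.Lex.right'
    · simp only [pvT2]
      rw [if_neg (by norm_num : ¬ (0:Int) < 0 - 1), if_neg (by norm_num : ¬ (0:Int) < 0)]
      omega
    · omega
  · apply Prod.Lex.right'
    · simp only [pvT2]
      rcases eq_or_lt_of_le (by omega : (1:Int) ≤ v) with h1 | h1
      · rw [← h1]; norm_num; omega
      · rw [if_pos (by omega : (0:Int) < v - 1), if_pos h]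
        have : 2 * (y + v) + (v - 1) * (v - 1 + 1) = 2 * y + v * (v + 1) := by ring
        omega
    · omega


-- A's inner 'while' loop: does the shot from velocities (xv, yv), currently at
-- (x, y), hit the target box before leaving it?
def fireLoopA (x y xv yv : Int) : Bool :=
  if x ≤ 215 ∧ y ≥ -132 then
    if x ≥ 155 ∧ x ≤ 215 ∧ y ≥ -132 ∧ y ≤ -72 then true
    else fireLoopA (x + xv) (y + yv) (if xv - 1 < 0 then 0 else xv - 1) (yv - 1)
  else false
termination_by ((2 * y + pvT2 yv + 268).toNat, (yv + 1).toNat)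
decreasing_by exact pvDecStep y yv (by omega)

def fire_broadside (good_x_velocities : List Int) (good_y_velocities : List Int) : List (Int × Int) :=
  good_x_velocities.foldl (fun hits starting_xv =>
    good_y_velocities.foldl (fun hits starting_yv =>
      if fireLoopA 0 0 starting_xv starting_yv then PySem.Set.add hits (starting_xv, starting_yv)
      else hits) hits) PySem.Set.empty

-- ===== PORT B =====
-- B's x_info while loop: collect the steps t at which x is inside [155, 215];
-- second component: some t0 if x freezes inside the band at step t0 (then every
-- step from t0 on is in range), else none
def xInfoLoop (steps : PySem.Set Int) (x v t : Int) : PySem.Set Int × Option Int :=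
  if x ≤ 215 then
    if v ≤ 0 then
      if x ≥ 155 then (steps, some t) else (steps, none)
    else
      xInfoLoop (if x ≥ 155 then PySem.Set.add steps t else steps) (x + v) (v - 1) (t + 1)
  else (steps, none)
termination_by (216 - x).toNat
decreasing_by omega

def pvXInfo (vx : Int) : PySem.Set Int × Option Int := xInfoLoop PySem.Set.empty 0 vx 0

-- B's y_steps while loop ('while y >= miny and (unbounded or t < t_lim)',
-- the short-circuit 'and' as nested ifs): steps t at which y is inside [-132, -72]
def yStepsLoop (ub : Bool) (tlim : Int) (steps : PySem.Set Int) (y v t : Int) : PySem.Set Int :=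
  if y ≥ -132 then
    if ub = true ∨ t < tlim then
      yStepsLoop ub tlim (if y ≤ -72 then PySem.Set.add steps t else steps) (y + v) (v - 1) (t + 1)
    else steps
  else steps
termination_by ((2 * y + pvT2 v + 268).toNat, (v + 1).toNat)
decreasing_by exact pvDecStep y v (by omega)

def pvYSteps (ub : Bool) (tlim : Int) (vy : Int) : PySem.Set Int :=
  yStepsLoop ub tlim PySem.Set.empty 0 vy 0

def fire_broadside_alt (good_x_velocities : List Int) (good_y_velocities : List Int) : List (Int × Int) :=
  let x_infos := good_x_velocities.map pvXInfo
  let unbounded := x_infos.any (fun p => p.2.isSome)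
  let t_lim := 1 + (PySem.List.max?
      (x_infos.map (fun p => (PySem.List.max? p.1 (fun z => z)).getD (-1))) (fun z => z)).getD (-1)
  let y_infos := good_y_velocities.map (pvYSteps unbounded t_lim)
  (good_x_velocities.zip x_infos).foldl (fun hits p =>
    (good_y_velocities.zip y_infos).foldl (fun hits q =>
      if (! PySem.Set.isdisjoint p.2.1 q.2) ||
          (match p.2.2 with
           | some t0 => q.2.any (fun u => decide (u ≥ t0))
           | none => false) then
        PySem.Set.add hits (p.1, q.1)
      else hits) hits) PySem.Set.empty

-- ===== PRECONDITION & SPEC =====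
def Spec_fire_broadside (good_x_velocities : List Int) (good_y_velocities : List Int) (out : List (Int × Int)) : Prop := out = fire_broadside_alt good_x_velocities good_y_velocities
instance (good_x_velocities : List Int) (good_y_velocities : List Int) (out : List (Int × Int)) : Decidable (Spec_fire_broadside good_x_velocities good_y_velocities out) := by unfold Spec_fire_broadside; infer_instance

-- ===== CLAIM (what is proved, stated in full; the proofs are below) =====
def Claim_equal_fire_broadside : Prop := ∀ (good_x_velocities : List Int) (good_y_velocities : List Int), Dom_fire_broadside good_x_velocities good_y_velocities → Spec_fire_broadside good_x_velocities good_y_velocities (fire_broadside good_x_velocities good_y_velocities)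

-- ===== LEMMAS AND PROOFS =====

-- trajectory positions/velocities at step t (proof-side abstractions)
def velX (vx : Int) : Nat → Int
  | 0 => vx
  | t + 1 => if velX vx t - 1 < 0 then 0 else velX vx t - 1

def posX (vx : Int) : Nat → Int
  | 0 => 0
  | t + 1 => posX vx t + velX vx t

def posY (vy : Int) : Nat → Int
  | 0 => 0
  | t + 1 => posY vy t + (vy - t)

def Xok (vx : Int) (t : Nat) : Prop := 155 ≤ posX vx t ∧ posX vx t ≤ 215
def Yok (vy : Int) (t : Nat) : Prop := -132 ≤ posY vy t ∧ posY vy t ≤ -72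

-- --- x trajectory facts ---

theorem velX_succ_nonneg (vx : Int) (t : Nat) : 0 ≤ velX vx (t + 1) := by
  simp only [velX]; split <;> omega

theorem posX_mono (vx : Int) : ∀ {s t : Nat}, 1 ≤ s → s ≤ t → posX vx s ≤ posX vx t := by
  intro s t h1 hst
  induction t with
  | zero => omega
  | succ n ih =>
    rcases Nat.lt_or_ge s (n + 1) with h | h
    · have hs : s ≤ n := by omega
      have hrec := ih hs
      have hv : 0 ≤ velX vx n := by
        cases n with
        | zero => omega
        | succ m => exact velX_succ_nonneg vx m
      simp only [posX]; omega
    · have : s = n + 1 := by omega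
      subst this; rfl

theorem posX_le_215 (vx : Int) {t t' : Nat} (h : t ≤ t') (hx : posX vx t' ≤ 215) :
    posX vx t ≤ 215 := by
  rcases Nat.eq_zero_or_pos t with h0 | h0
  · subst h0; simp [posX]
  · exact le_trans (posX_mono vx h0 h) hx

-- --- y trajectory facts ---

theorem posY_closed (vy : Int) (t : Nat) : 2 * posY vy t = (t : Int) * (2 * vy + 1 - t) := by
  induction t with
  | zero => simp [posY]
  | succ n ih =>
    simp only [posY]
    push_cast
    push_cast at ih
    linarith [ih]

theorem posY_ge (vy : Int) {s t : Nat} (h : s ≤ t) (ht : -132 ≤ posY vy t) :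
    -132 ≤ posY vy s := by
  have hs := posY_closed vy s
  have hts := posY_closed vy t
  have ha : (0:Int) ≤ (s:Int) := Int.natCast_nonneg s
  have hab : (s:Int) ≤ (t:Int) := by exact_mod_cast h
  have h2 : (t:Int) * (2 * vy + 1 - t) ≥ -264 := by omega
  have key : (s:Int) * (2 * vy + 1 - s) ≥ -264 := by
    by_cases hc : 2 * vy + 1 ≤ (s:Int) + t
    · nlinarith
    · nlinarith
  omega

-- --- A's loop computes: ∃ a step at which both coordinates are inside the box ---

theorem loopA_of_ok (vx vy : Int) : ∀ (k t : Nat), Xok vx (t + k) → Yok vy (t + k) →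
    fireLoopA (posX vx t) (posY vy t) (velX vx t) (vy - t) = true := by
  intro k
  induction k with
  | zero =>
    intro t hx hy
    rw [fireLoopA]
    rw [if_pos ⟨hx.2, hy.1⟩, if_pos ⟨hx.1, hx.2, hy.1, hy.2⟩]
  | succ n ih =>
    intro t hx hy
    rw [fireLoopA]
    have hgx : posX vx t ≤ 215 := posX_le_215 vx (by omega) hx.2
    have hgy : posY vy t ≥ -132 := posY_ge vy (by omega) hy.1
    rw [if_pos ⟨hgx, hgy⟩]
    split
    · rfl
    · have e1 : posX vx t + velX vx t = posX vx (t + 1) := rfl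
      have e2 : posY vy t + (vy - t) = posY vy (t + 1) := by
        simp only [posY]
      have e3 : (if velX vx t - 1 < 0 then 0 else velX vx t - 1) = velX vx (t + 1) := rfl
      have e4 : vy - (t:Int) - 1 = vy - ((t + 1 : Nat) : Int) := by push_cast; ring
      rw [e1, e2, e3, e4]
      have hx' : Xok vx ((t + 1) + n) := by rw [show (t + 1) + n = t + (n + 1) by omega]; exact hx
      have hy' : Yok vy ((t + 1) + n) := by rw [show (t + 1) + n = t + (n + 1) by omega]; exact hy
      exact ih (t + 1) hx' hy'

theorem loopA_to_ok : ∀ (x y xv yv : Int), fireLoopA x y xv yv = true →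
    ∀ (vx vy : Int) (t : Nat), x = posX vx t → y = posY vy t → xv = velX vx t →
    yv = vy - t → ∃ t', Xok vx t' ∧ Yok vy t' := by
  intro x y xv yv
  induction x, y, xv, yv using fireLoopA.induct with
  | case1 x y xv yv hg hbox =>
    intro _ vx vy t hx hy _ _
    exact ⟨t, ⟨by omega, by omega⟩, ⟨by omega, by omega⟩⟩
  | case2 x y xv yv hg hbox ih =>
    intro htrue vx vy t hx hy hxv hyv
    rw [fireLoopA, if_pos hg, if_neg hbox] at htrue
    refine ih htrue vx vy (t + 1) ?_ ?_ ?_ ?_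
    · simp only [posX]; omega
    · simp only [posY]; omega
    · simp only [velX, ← hxv]; split <;> omega
    · push_cast; omega
  | case3 x y xv yv hg =>
    intro htrue
    rw [fireLoopA, if_neg hg] at htrue
    exact absurd htrue (by simp)

theorem loopA_iff (vx vy : Int) :
    fireLoopA 0 0 vx vy = true ↔ ∃ t, Xok vx t ∧ Yok vy t := by
  constructor
  · intro h
    exact loopA_to_ok 0 0 vx vy h vx vy 0 rfl rfl rfl (by simp)
  · rintro ⟨t, hx, hy⟩
    have := loopA_of_ok vx vy t 0 (by simpa using hx) (by simpa using hy)
    simpa [posX, posY, velX] using this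

theorem zip_map_foldl {α β γ : Type} (g : α → β) (F : γ → α × β → γ) :
    ∀ (l : List α) (init : γ), (l.zip (l.map g)).foldl F init =
      l.foldl (fun a x => F a (x, g x)) init := by
  intro l
  induction l with
  | nil => intro init; rfl
  | cons h t ih => intro init; simp only [List.map, List.zip, List.zipWith, List.foldl]; exact ih _

-- --- frozen-x facts ---

theorem velX_stay_zero (vx : Int) {t : Nat} (h : velX vx t = 0) :
    ∀ s, t ≤ s → velX vx s = 0 := by
  intro s hs
  induction s with
  | zero => have : t = 0 := by omega
            subst this; exact h
  | succ n ih =>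
    rcases Nat.lt_or_ge t (n + 1) with hlt | hge
    · have := ih (by omega)
      simp only [velX, this]
      norm_num
    · have : t = n + 1 := by omega
      subst this; exact h

theorem posX_frozen (vx : Int) {t : Nat} (h : velX vx t = 0) :
    ∀ s, t ≤ s → posX vx s = posX vx t := by
  intro s hs
  induction s with
  | zero => have : t = 0 := by omega
            subst this; rfl
  | succ n ih =>
    rcases Nat.lt_or_ge t (n + 1) with hlt | hge
    · have h1 := ih (by omega)
      have h2 := velX_stay_zero vx h n (by omega)
      simp only [posX, h1, h2, add_zero]
    · have : t = n + 1 := by omega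
      subst this; rfl

theorem velX_zero_of_le (vx : Int) {t : Nat} (h1 : 1 ≤ t) (h : velX vx t ≤ 0) :
    velX vx t = 0 := by
  cases t with
  | zero => omega
  | succ m => have := velX_succ_nonneg vx m; omega

theorem posX_neg_start (vx : Int) (h : vx ≤ 0) : ∀ s, 1 ≤ s → posX vx s = vx := by
  have h1 : posX vx 1 = vx := by simp [posX, velX]
  have hv : velX vx 1 = 0 := by simp only [velX]; split <;> omega
  intro s hs
  rw [posX_frozen vx hv s hs, h1]

-- --- B's x loop: tail soundness and membership ---

theorem xLoop_spec : ∀ (steps : PySem.Set Int) (x v t : Int), ∀ (vx : Int) (tn : Nat),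
    x = posX vx tn → v = velX vx tn → t = (tn : Int) →
    (∀ t0, (xInfoLoop steps x v t).2 = some t0 →
        ∃ t0n : Nat, t0 = (t0n : Int) ∧ tn ≤ t0n ∧ ∀ s, t0n ≤ s → Xok vx s) ∧
    (∀ u, u ∈ (xInfoLoop steps x v t).1 ↔ u ∈ steps ∨ ∃ s : Nat, tn ≤ s ∧ u = (s : Int) ∧
        Xok vx s ∧ (∀ t0, (xInfoLoop steps x v t).2 = some t0 → (s : Int) < t0)) := by
  intro steps x v t
  induction steps, x, v, t using xInfoLoop.induct with
  | case1 steps x v t hg hv hx =>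
    -- x ≤ 215, v ≤ 0, x ≥ 155: freeze inside the band
    intro vx tn hxe hve hte
    rw [xInfoLoop, if_pos hg, if_pos hv, if_pos hx]
    have htn1 : 1 ≤ tn := by
      by_contra h0
      have : tn = 0 := by omega
      subst this
      have hp0 : posX vx 0 = 0 := rfl
      omega
    have hvz : velX vx tn = 0 := velX_zero_of_le vx htn1 (by omega)
    constructor
    · intro t0 ht0
      have ht0' : t0 = t := (Option.some.inj ht0).symm
      refine ⟨tn, by omega, le_refl _, ?_⟩
      intro s hs
      have hfr := posX_frozen vx hvz s hs
      exact ⟨by omega, by omega⟩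
    · intro u
      simp only
      constructor
      · intro hu; exact Or.inl hu
      · rintro (hu | ⟨s, hs, hus, hok, hcond⟩)
        · exact hu
        · have := hcond t rfl
          omega
  | case2 steps x v t hg hv hx =>
    -- x ≤ 215, v ≤ 0, x < 155: frozen below the band, never in range again
    intro vx tn hxe hve hte
    rw [xInfoLoop, if_pos hg, if_pos hv, if_neg hx]
    refine ⟨by intro t0 ht0; simp at ht0, ?_⟩
    intro u
    simp only
    constructor
    · intro hu; exact Or.inl hu
    · rintro (hu | ⟨s, hs, hus, hok, hcond⟩)
      · exact hu
      · exfalso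
        rcases Nat.eq_zero_or_pos tn with h0 | h0
        · subst h0
          rcases Nat.eq_zero_or_pos s with hs0 | hs0
          · subst hs0
            have h1 := hok.1
            have h2 : posX vx 0 = 0 := rfl
            omega
          · have hneg : vx ≤ 0 := by
              have : velX vx 0 = vx := rfl
              omega
            have := posX_neg_start vx hneg s hs0
            have := hok.1
            omega
        · have hvz : velX vx tn = 0 := velX_zero_of_le vx h0 (by omega)
          have := posX_frozen vx hvz s hs
          have := hok.1
          omega
  | case3 steps x v t hg hv ih =>
    -- x ≤ 215, v ≥ 1: step
    intro vx tn hxe hve hte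
    have e1 : x + v = posX vx (tn + 1) := by simp only [posX]; omega
    have e2 : v - 1 = velX vx (tn + 1) := by simp only [velX, ← hve]; split <;> omega
    have e3 : t + 1 = ((tn + 1 : Nat) : Int) := by push_cast; omega
    obtain ⟨ihTail, ihMem⟩ := ih vx (tn + 1) e1 e2 e3
    simp only [dite_eq_ite] at ihTail ihMem
    rw [xInfoLoop, if_pos hg, if_neg hv]
    refine ⟨?_, ?_⟩
    · intro t0 ht0
      rcases ihTail t0 ht0 with ⟨t0n, ht0e, ht0ge, hall⟩
      exact ⟨t0n, ht0e, by omega, hall⟩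
    · intro u
      rw [ihMem u]
      have hmem : u ∈ (if x ≥ 155 then PySem.Set.add steps t else steps) ↔
          u ∈ steps ∨ (x ≥ 155 ∧ u = t) := by
        split
        · rw [PySem.Set.mem_add]; tauto
        · tauto
      rw [hmem]
      constructor
      · rintro ((hu | ⟨hge, hut⟩) | ⟨s, hs, hus, hok, hcond⟩)
        · exact Or.inl hu
        · refine Or.inr ⟨tn, le_refl _, by omega, ⟨by omega, by omega⟩, ?_⟩
          intro t0 ht0
          rcases ihTail t0 ht0 with ⟨t0n, ht0e, ht0ge, _⟩
          omega
        · exact Or.inr ⟨s, by omega, hus, hok, hcond⟩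
      · rintro (hu | ⟨s, hs, hus, hok, hcond⟩)
        · exact Or.inl (Or.inl hu)
        · rcases Nat.eq_or_lt_of_le hs with he | hlt
          · subst he
            exact Or.inl (Or.inr ⟨by have := hok.1; omega, by omega⟩)
          · exact Or.inr ⟨s, by omega, hus, hok, hcond⟩
  | case4 steps x v t hg =>
    -- x > 215: overshoot, x only grows from here
    intro vx tn hxe hve hte
    rw [xInfoLoop, if_neg hg]
    refine ⟨by intro t0 ht0; simp at ht0, ?_⟩
    intro u
    simp only
    constructor
    · intro hu; exact Or.inl hu
    · rintro (hu | ⟨s, hs, hus, hok, hcond⟩)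
      · exact hu
      · exfalso
        have htn1 : 1 ≤ tn := by
          by_contra h0
          have : tn = 0 := by omega
          subst this
          have hp0 : posX vx 0 = 0 := rfl
          omega
        have := posX_mono vx htn1 hs
        have := hok.2
        omega

theorem xInfo_tail {vx : Int} {t0 : Int} (h : (pvXInfo vx).2 = some t0) :
    ∃ t0n : Nat, t0 = (t0n : Int) ∧ ∀ s, t0n ≤ s → Xok vx s := by
  have hs := xLoop_spec PySem.Set.empty 0 vx 0 vx 0 (by simp [posX]) (by simp [velX]) (by simp)
  rcases hs.1 t0 h with ⟨t0n, he, _, hall⟩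
  exact ⟨t0n, he, hall⟩

theorem xInfo_mem (vx u : Int) :
    u ∈ (pvXInfo vx).1 ↔ ∃ s : Nat, u = (s : Int) ∧ Xok vx s ∧
      (∀ t0, (pvXInfo vx).2 = some t0 → (s : Int) < t0) := by
  have hs := xLoop_spec PySem.Set.empty 0 vx 0 vx 0 (by simp [posX]) (by simp [velX]) (by simp)
  rw [pvXInfo] at *
  rw [hs.2 u]
  simp only [PySem.Set.empty, List.not_mem_nil, false_or, Nat.zero_le, true_and]

-- --- B's y loop: membership ---

theorem yLoop_mem (ub : Bool) (tlim : Int) :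
    ∀ (steps : PySem.Set Int) (y v t : Int), ∀ (vy : Int) (tn : Nat),
    y = posY vy tn → v = vy - tn → t = (tn : Int) →
    ∀ u, (u ∈ yStepsLoop ub tlim steps y v t ↔
      u ∈ steps ∨ ∃ s : Nat, tn ≤ s ∧ u = (s : Int) ∧ Yok vy s ∧
        (ub = true ∨ (s : Int) < tlim)) := by
  intro steps y v t
  induction steps, y, v, t using yStepsLoop.induct ub tlim with
  | case1 steps y v t hg hc ih =>
    intro vy tn hy hv ht u
    simp only [dite_eq_ite] at ih
    rw [yStepsLoop, if_pos hg, if_pos hc]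
    rw [ih vy (tn + 1) (by simp only [posY]; omega) (by push_cast; omega) (by push_cast; omega) u]
    have hmem : u ∈ (if y ≤ -72 then PySem.Set.add steps t else steps) ↔
        u ∈ steps ∨ (y ≤ -72 ∧ u = t) := by
      split
      · rw [PySem.Set.mem_add]; tauto
      · tauto
    rw [hmem]
    constructor
    · rintro ((hu | ⟨hle, hut⟩) | ⟨s, hs, hus, hok, hcond⟩)
      · exact Or.inl hu
      · refine Or.inr ⟨tn, le_refl _, by omega, ⟨by omega, by omega⟩, ?_⟩
        rcases hc with hc | hc
        · exact Or.inl hc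
        · exact Or.inr (by omega)
      · exact Or.inr ⟨s, by omega, hus, hok, hcond⟩
    · rintro (hu | ⟨s, hs, hus, hok, hcond⟩)
      · exact Or.inl (Or.inl hu)
      · rcases Nat.eq_or_lt_of_le hs with he | hlt
        · subst he
          exact Or.inl (Or.inr ⟨by have := hok.2; omega, by omega⟩)
        · exact Or.inr ⟨s, by omega, hus, hok, hcond⟩
  | case2 steps y v t hg hc =>
    intro vy tn hy hv ht u
    rw [yStepsLoop, if_pos hg, if_neg hc]
    constructor
    · intro hu; exact Or.inl hu
    · rintro (hu | ⟨s, hs, hus, hok, hcond⟩)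
      · exact hu
      · exfalso
        have hc1 : ¬ ub = true := fun h => hc (Or.inl h)
        have hc2 : ¬ t < tlim := fun h => hc (Or.inr h)
        rcases hcond with hcond | hcond
        · exact hc1 hcond
        · have : ((tn : Int)) ≤ (s : Int) := by exact_mod_cast hs
          omega
  | case3 steps y v t hg =>
    intro vy tn hy hv ht u
    rw [yStepsLoop, if_neg hg]
    constructor
    · intro hu; exact Or.inl hu
    · rintro (hu | ⟨s, hs, hus, hok, hcond⟩)
      · exact hu
      · exact absurd (posY_ge vy hs hok.1) (by omega)

theorem ySteps_mem (ub : Bool) (tlim : Int) (vy u : Int) :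
    u ∈ pvYSteps ub tlim vy ↔ ∃ s : Nat, u = (s : Int) ∧ Yok vy s ∧
      (ub = true ∨ (s : Int) < tlim) := by
  have h := yLoop_mem ub tlim PySem.Set.empty 0 vy 0 vy 0 (by simp [posY]) (by simp) (by simp) u
  rw [pvYSteps, h]
  simp only [PySem.Set.empty, List.not_mem_nil, false_or, Nat.zero_le, true_and]

-- --- per-pair predicate equality ---

theorem pred_eq (vx vy : Int) (ub : Bool) (tlim : Int)
    (hub : ∀ t0, (pvXInfo vx).2 = some t0 → ub = true)
    (hlim : ∀ u, u ∈ (pvXInfo vx).1 → u < tlim) :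
    (((! PySem.Set.isdisjoint (pvXInfo vx).1 (pvYSteps ub tlim vy)) ||
      (match (pvXInfo vx).2 with
       | some t0 => (pvYSteps ub tlim vy).any (fun u => decide (u ≥ t0))
       | none => false)) = fireLoopA 0 0 vx vy) := by
  rw [Bool.eq_iff_iff, loopA_iff vx vy]
  simp only [Bool.or_eq_true, Bool.not_eq_true', Bool.eq_false_iff, ne_eq,
    PySem.Set.isdisjoint_iff]
  constructor
  · rintro (hdis | hany)
    · rcases not_forall.mp hdis with ⟨u, hu⟩
      rw [Classical.not_imp] at hu
      obtain ⟨hux, huy'⟩ := hu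
      have huy := not_not.mp huy'
      rcases (xInfo_mem vx u).mp hux with ⟨s, hus, hokx, _⟩
      rcases (ySteps_mem ub tlim vy u).mp huy with ⟨s', hus', hoky, _⟩
      have hss : s = s' := by omega
      subst hss
      exact ⟨s, hokx, hoky⟩
    · rcases hmt : (pvXInfo vx).2 with _ | t0
      · rw [hmt] at hany
        simp at hany
      · rw [hmt] at hany
        simp only [List.any_eq_true, decide_eq_true_iff] at hany
        rcases hany with ⟨u, huy, hge⟩
        rcases (ySteps_mem ub tlim vy u).mp huy with ⟨s, hus, hoky, _⟩
        rcases xInfo_tail hmt with ⟨t0n, ht0e, hall⟩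
        exact ⟨s, hall s (by omega), hoky⟩
  · rintro ⟨s, hokx, hoky⟩
    rcases hmt : (pvXInfo vx).2 with _ | t0
    · have hsx : ((s : Int)) ∈ (pvXInfo vx).1 :=
        (xInfo_mem vx _).mpr ⟨s, rfl, hokx, by
          intro t0 h
          rw [hmt] at h
          exact absurd h (by simp)⟩
      have hsy : ((s : Int)) ∈ pvYSteps ub tlim vy :=
        (ySteps_mem ub tlim vy _).mpr ⟨s, rfl, hoky, Or.inr (hlim _ hsx)⟩
      left
      intro hall
      exact (hall _ hsx) hsy
    · have hub' : ub = true := hub t0 hmt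
      have hsy : ((s : Int)) ∈ pvYSteps ub tlim vy :=
        (ySteps_mem ub tlim vy _).mpr ⟨s, rfl, hoky, Or.inl hub'⟩
      by_cases hge : ((s : Int)) ≥ t0
      · right
        exact List.any_eq_true.mpr ⟨_, hsy, by simpa using hge⟩
      · have hsx : ((s : Int)) ∈ (pvXInfo vx).1 :=
          (xInfo_mem vx _).mpr ⟨s, rfl, hokx, by
            intro t0' h'
            rw [hmt] at h'
            have := Option.some.inj h'
            omega⟩
        left
        intro hall2
        exact (hall2 _ hsx) hsy

-- --- the computed flag and bound satisfy pred_eq's hypotheses ---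

theorem hub_all (gx : List Int) {vx : Int} (hvx : vx ∈ gx) :
    ∀ t0, (pvXInfo vx).2 = some t0 → (gx.map pvXInfo).any (fun p => p.2.isSome) = true := by
  intro t0 h
  rw [List.any_eq_true]
  exact ⟨pvXInfo vx, List.mem_map.mpr ⟨vx, hvx, rfl⟩, by rw [h]; rfl⟩

theorem hlim_all (gx : List Int) {vx : Int} (hvx : vx ∈ gx) :
    ∀ u, u ∈ (pvXInfo vx).1 →
      u < 1 + (PySem.List.max?
        ((gx.map pvXInfo).map (fun p => (PySem.List.max? p.1 (fun z => z)).getD (-1)))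
        (fun z => z)).getD (-1) := by
  intro u hu
  rcases h1 : PySem.List.max? (pvXInfo vx).1 (fun z => z) with _ | m1
  · rw [PySem.List.max?_eq_none_iff] at h1
    rw [h1] at hu
    simp at hu
  · have hum1 : u ≤ m1 := by simpa using PySem.List.max?_isMax h1 _ hu
    have hm1mem : ((PySem.List.max? (pvXInfo vx).1 (fun z => z)).getD (-1)) ∈
        (gx.map pvXInfo).map (fun p => (PySem.List.max? p.1 (fun z => z)).getD (-1)) :=
      List.mem_map.mpr ⟨pvXInfo vx, List.mem_map.mpr ⟨vx, hvx, rfl⟩, rfl⟩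
    rcases h2 : PySem.List.max?
        ((gx.map pvXInfo).map (fun p => (PySem.List.max? p.1 (fun z => z)).getD (-1)))
        (fun z => z) with _ | m2
    · rw [PySem.List.max?_eq_none_iff] at h2
      rw [h2] at hm1mem
      simp at hm1mem
    · have hel := PySem.List.max?_isMax h2 _ hm1mem
      rw [h1, Option.getD_some] at hel
      rw [h2, Option.getD_some]
      omega

theorem fire_broadside_spec : Claim_equal_fire_broadside := by
  intro gx gy _
  unfold Spec_fire_broadside fire_broadside fire_broadside_alt
  simp only [zip_map_foldl]
  apply PySem.List.foldl_congr_mem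
  intro acc vx hvx
  apply PySem.List.foldl_congr_mem
  intro acc' vy _
  simp only [pred_eq vx vy _ _ (hub_all gx hvx) (hlim_all gx hvx)]
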